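-- pv_equiv track=rewrite | github.com/juliafox8/cm-codes | Programming_a4/sieve.py | sift2
-- ===== SOURCE A (Python) =====
-- def sift2(lst,k):
--     i = 0
--     while i < len(lst):
--         if lst[i] % k == 0:
--             lst.remove(lst[i])
--         else:
--             i = i + 1
--     return lst
-- ===== SOURCE B (Python) =====
-- def sift2(lst, k):
--     # Single-pass in-place two-pointer compaction; mutates the same list object like A.
--     j = 0
--     for i in range(len(lst)):
--         if lst[i] % k != 0:
--             lst[j] = lst[i]
--             j += 1
--     del lst[j:]
--     return lst
-- ===== Notes on version B (the rewrite author's own statement) =====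
-- stated objective: faster
-- what changed: Replaces the repeated lst.remove scan-and-shift loop with a single-pass in-place two-pointer compaction (write index j, truncate tail), keeping the same list object mutated.
import Mathlib
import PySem

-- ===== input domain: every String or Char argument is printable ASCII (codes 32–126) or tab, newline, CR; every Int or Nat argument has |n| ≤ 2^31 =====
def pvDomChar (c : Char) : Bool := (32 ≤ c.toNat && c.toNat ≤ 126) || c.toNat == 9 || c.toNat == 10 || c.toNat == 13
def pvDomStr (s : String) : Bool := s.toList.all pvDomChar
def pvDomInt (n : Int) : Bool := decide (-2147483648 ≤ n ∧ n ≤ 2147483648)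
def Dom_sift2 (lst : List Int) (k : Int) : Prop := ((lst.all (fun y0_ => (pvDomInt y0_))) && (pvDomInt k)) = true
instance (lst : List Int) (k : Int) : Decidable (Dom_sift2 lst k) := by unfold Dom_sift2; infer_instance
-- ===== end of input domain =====

-- B replaces A's quadratic repeated-remove loop with a single-pass in-place two-pointer
-- compaction; both mutate the argument list in place in Python, the proof is about the return value.

-- ===== PORT A =====
-- while i < len(lst): if lst[i] % k == 0: lst.remove(lst[i]) else: i += 1
def sift2Loop (lst : List Int) (i : Nat) (k : Int) : List Int :=
  if h : i < lst.length then
    if PySem.Int.mod lst[i] k == 0 then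
      sift2Loop ((PySem.List.remove? lst lst[i]).getD []) i k
    else
      sift2Loop lst (i + 1) k
  else lst
termination_by lst.length - i
decreasing_by
  · have hm : PySem.List.remove? lst lst[i] = some (lst.erase lst[i]) :=
      PySem.List.remove?_eq_some_erase _ _ (List.getElem_mem h)
    have : (lst.erase lst[i]).length + 1 = lst.length :=
      List.length_erase_add_one (List.getElem_mem h)
    simp [hm]; omega
  · omega

def sift2 (lst : List Int) (k : Int) : List Int := sift2Loop lst 0 k

-- ===== PORT B =====
-- j = 0; for i in range(len(lst)): if lst[i] % k != 0: lst[j] = lst[i]; j += 1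
-- then del lst[j:]; return lst
def sift2AltLoop (lst : List Int) (i j : Nat) (k : Int) : List Int × Nat :=
  if h : i < lst.length then
    if PySem.Int.mod lst[i] k != 0 then
      sift2AltLoop (lst.set j lst[i]) (i + 1) (j + 1) k
    else
      sift2AltLoop lst (i + 1) j k
  else (lst, j)
termination_by lst.length - i
decreasing_by
  · simp; omega
  · omega

def sift2_alt (lst : List Int) (k : Int) : List Int :=
  let r := sift2AltLoop lst 0 0 k
  r.1.take r.2

-- ===== PRECONDITION & SPEC =====
-- Python A raises ZeroDivisionError when k = 0 and the list is nonempty; excluded.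
def Pre_sift2 (lst : List Int) (k : Int) : Prop := k ≠ 0 ∨ lst = []
instance (lst : List Int) (k : Int) : Decidable (Pre_sift2 lst k) := by unfold Pre_sift2; infer_instance
def pvWitness_sift2 : List Int × Int := ([6, 7, 9, 10], 3)

def Spec_sift2 (lst : List Int) (k : Int) (out : List Int) : Prop := out = sift2_alt lst k
instance (lst : List Int) (k : Int) (out : List Int) : Decidable (Spec_sift2 lst k out) := by unfold Spec_sift2; infer_instance

-- ===== CLAIM (what is proved, stated in full; the proofs are below) =====
def Claim_equal_sift2 : Prop := ∀ (lst : List Int) (k : Int), Dom_sift2 lst k → Pre_sift2 lst k → Spec_sift2 lst k (sift2 lst k)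

-- ===== LEMMAS AND PROOFS =====

-- the common characterisation: keep exactly the elements not divisible by k
def keepP (k : Int) (x : Int) : Bool := PySem.Int.mod x k != 0

lemma sift2Loop_eq_filter (k : Int) : ∀ (n : Nat) (lst : List Int) (i : Nat),
    lst.length - i ≤ n → (∀ x ∈ lst.take i, keepP k x = true) →
    sift2Loop lst i k = lst.take i ++ (lst.drop i).filter (keepP k) := by
  intro n
  induction n with
  | zero =>
    intro lst i hn _
    have hle : lst.length ≤ i := by omega
    rw [sift2Loop]
    simp [Nat.not_lt.mpr hle, List.take_of_length_le hle, List.drop_of_length_le hle]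
  | succ m ih =>
    intro lst i hn hpre
    rw [sift2Loop]
    by_cases h : i < lst.length
    · simp only [h, dif_pos]
      have hsplit : lst.drop i = lst[i] :: lst.drop (i + 1) := List.drop_eq_getElem_cons h
      by_cases hdiv : PySem.Int.mod lst[i] k == 0
      · simp only [hdiv, if_pos]
        have hnotmem : lst[i] ∉ lst.take i := by
          intro hmem
          have ht := hpre _ hmem
          simp [keepP] at ht
          simp at hdiv
          exact ht hdiv
        have hm : PySem.List.remove? lst lst[i] = some (lst.erase lst[i]) :=
          PySem.List.remove?_eq_some_erase _ _ (List.getElem_mem h)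
        have hdec : lst = lst.take i ++ lst[i] :: lst.drop (i + 1) := by
          conv_lhs => rw [← List.take_append_drop i lst]
          rw [hsplit]
        have herase : lst.erase lst[i] = lst.take i ++ lst.drop (i + 1) := by
          nth_rewrite 1 [hdec]
          rw [List.erase_append_right _ (by simpa using hnotmem)]
          simp only [List.erase_cons_head]
        rw [hm]
        simp only [Option.getD_some, herase]
        have hlen : (lst.take i).length = i := by
          simp [List.length_take]; omega
        have h1 : (lst.take i ++ lst.drop (i + 1)).take i = lst.take i := by
          rw [List.take_append_of_le_length (by omega)]
          simp [List.take_take]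
        have h2 : (lst.take i ++ lst.drop (i + 1)).drop i = lst.drop (i + 1) := by
          rw [List.drop_append_of_le_length (by omega)]
          simp [hlen]
        have hz : keepP k lst[i] = false := by
          simp only [keepP]
          simpa using hdiv
        have hlen' : (lst.take i ++ lst.drop (i + 1)).length - i ≤ m := by
          simp [hlen]; omega
        rw [ih _ _ hlen' (by rw [h1]; exact hpre), h1, h2, hsplit, List.filter_cons, hz]
        simp
      · simp only [hdiv, if_neg, Bool.not_eq_true]
        have hkeep : keepP k lst[i] = true := by simp [keepP]; simpa using hdiv
        have hpre' : ∀ x ∈ lst.take (i + 1), keepP k x = true := by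
          intro x hx
          rw [List.take_succ] at hx
          simp only [List.mem_append] at hx
          rcases hx with hx | hx
          · exact hpre x hx
          · simp [List.getElem?_eq_getElem h] at hx
            subst hx; exact hkeep
        have htk : lst.take (i + 1) = lst.take i ++ [lst[i]] := by
          rw [List.take_add_one, List.getElem?_eq_getElem h]
          simp
        rw [ih _ _ (by omega) hpre', hsplit, List.filter_cons, hkeep, htk,
          List.append_assoc]
        simp only [if_true, List.singleton_append]
    · simp only [h, dif_neg, not_false_iff]
      have hle : lst.length ≤ i := by omega
      simp [List.take_of_length_le hle, List.drop_of_length_le hle]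

lemma sift2AltLoop_eq_filter (k : Int) : ∀ (n : Nat) (lst : List Int) (i j : Nat),
    lst.length - i ≤ n → j ≤ i →
    (sift2AltLoop lst i j k).1.take (sift2AltLoop lst i j k).2
      = lst.take j ++ (lst.drop i).filter (keepP k) := by
  intro n
  induction n with
  | zero =>
    intro lst i j hn hj
    have hle : lst.length ≤ i := by omega
    rw [sift2AltLoop]
    simp [Nat.not_lt.mpr hle, List.drop_of_length_le hle]
  | succ m ih =>
    intro lst i j hn hj
    rw [sift2AltLoop]
    by_cases h : i < lst.length
    · simp only [h, dif_pos]
      have hsplit : lst.drop i = lst[i] :: lst.drop (i + 1) := List.drop_eq_getElem_cons h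
      by_cases hk : keepP k lst[i]
      · have hk' : (PySem.Int.mod lst[i] k != 0) = true := hk
        simp only [hk', if_pos]
        have hjlen : j < lst.length := by omega
        rw [ih _ _ _ (by simp; omega) (by omega)]
        have htake : (lst.set j lst[i]).take (j + 1) = lst.take j ++ [lst[i]] := by
          rw [List.take_add_one, List.take_set_of_le (Nat.le_refl j),
            List.getElem?_set_self hjlen]
          simp
        have hdrop : (lst.set j lst[i]).drop (i + 1) = lst.drop (i + 1) :=
          List.drop_set_of_lt (by omega)
        rw [htake, hdrop, hsplit, List.filter_cons]
        simp [hk]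
      · have hk' : (PySem.Int.mod lst[i] k != 0) = false := by
          have h2 : keepP k lst[i] = false := by simpa using hk
          exact h2
        simp only [hk', if_neg, Bool.false_eq_true, not_false_iff]
        rw [ih _ _ _ (by omega) (by omega), hsplit, List.filter_cons]
        have hz : keepP k lst[i] = false := hk'
        rw [hz]
        simp
    · simp only [h, dif_neg, not_false_iff]
      have hle : lst.length ≤ i := by omega
      simp [List.drop_of_length_le hle]

-- ===== VERDICT (by name: the statement is the Claim_ definition above) =====
theorem sift2_spec : Claim_equal_sift2 := by
  intro lst k _ _
  have hA := sift2Loop_eq_filter k lst.length lst 0 (by omega) (by simp)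
  have hB := sift2AltLoop_eq_filter k lst.length lst 0 0 (by omega) (by omega)
  unfold Spec_sift2 sift2 sift2_alt
  simp only [hA, hB, List.drop_zero, List.take_zero, List.nil_append]
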